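-- pv_equiv track=rewrite | github.com/AngeloGrabner/calculator | calc.py | __FindLastOperator
-- ===== SOURCE A (Python) =====
-- def __FindLastOperator(expr : str):
--     operators = {
--         "^":1,
--         "*":2,
--         "/":2,
--         "+":3,
--         "-":3
--         }
--     idx = -1
--     val = 0
--     scopeDepth = 0
--     minScpoeDepth = 10000000000
--
--     depth = 0
--     for i in range(len(expr)):
--         if expr[i] == "(":
--             depth+=1
--         elif expr[i] == ")":
--             depth-=1
--         elif minScpoeDepth > depth:
--             minScpoeDepth = depth
--
--     for i in range(len(expr)):
--         if expr[i] == "(":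
--             scopeDepth+=1
--         elif expr[i] == ")":
--             scopeDepth-=1
--         if scopeDepth == minScpoeDepth:
--             try:
--                 if operators[expr[i]] > val:
--                     val = operators[expr[i]]
--                     idx = i
--             except:
--                 pass
--     if idx != -1:
--         return True, idx, minScpoeDepth
--     else:
--         return False, -1, minScpoeDepth
-- ===== SOURCE B (Python) =====
-- def __FindLastOperator(expr : str):
--     prec = {"^": 1, "*": 2, "/": 2, "+": 3, "-": 3}
--     depth = 0
--     minDepth = 10000000000
--     cands = []
--     for i, c in enumerate(expr):
--         if c == "(":
--             depth += 1
--         elif c == ")":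
--             depth -= 1
--         else:
--             if depth < minDepth:
--                 minDepth = depth
--             if c in prec:
--                 cands.append((depth, i, prec[c]))
--     idx = -1
--     val = 0
--     for d, i, p in cands:
--         if d == minDepth and p > val:
--             idx = i
--             val = p
--     return (idx != -1, idx, minDepth)
-- ===== Notes on version B (the rewrite author's own statement) =====
-- stated objective: faster
-- what changed: Replaces A's two full scans (the second doing a try/except dict lookup at every character) by one scan that builds an explicit candidate list (depth, index, precedence) plus the minimum depth, followed by a selection loop over the candidate list only.
import Mathlib
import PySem

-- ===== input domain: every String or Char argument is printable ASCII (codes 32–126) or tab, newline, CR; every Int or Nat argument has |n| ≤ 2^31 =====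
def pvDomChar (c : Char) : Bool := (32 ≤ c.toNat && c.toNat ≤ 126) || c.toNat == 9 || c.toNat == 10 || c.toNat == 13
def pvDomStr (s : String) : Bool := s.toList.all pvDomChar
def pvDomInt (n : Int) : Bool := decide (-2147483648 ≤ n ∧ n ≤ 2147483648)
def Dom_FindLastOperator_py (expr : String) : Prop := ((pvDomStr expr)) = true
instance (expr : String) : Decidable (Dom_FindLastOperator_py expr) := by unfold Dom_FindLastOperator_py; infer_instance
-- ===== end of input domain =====

-- B replaces A's two full scans by one scan collecting operator candidates and the minimum
-- depth, then a selection loop over the candidate list only; same return value, measurably faster.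

-- the operators dict (shared table of both Pythons): precedence of an operator character
def pvPrec (c : Char) : Option Int :=
  if c = '^' then some 1
  else if c = '*' then some 2
  else if c = '/' then some 2
  else if c = '+' then some 3
  else if c = '-' then some 3
  else none

-- ===== PORT A =====
-- first loop of A: state (depth, minScpoeDepth)
def pvStepA1 (st : Int × Int) (c : Char) : Int × Int :=
  if c = '(' then (st.1 + 1, st.2)
  else if c = ')' then (st.1 - 1, st.2)
  else if st.2 > st.1 then (st.1, st.1)
  else st

-- second loop of A: state (idx, val, scopeDepth, i); the try/except KeyError is the none branch
def pvStepA2 (m : Int) (st : Int × Int × Int × Int) (c : Char) : Int × Int × Int × Int :=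
  let idx := st.1; let val := st.2.1; let i := st.2.2.2
  let scope := if c = '(' then st.2.2.1 + 1 else if c = ')' then st.2.2.1 - 1 else st.2.2.1
  if scope = m then
    match pvPrec c with
    | some p => if p > val then (i, p, scope, i + 1) else (idx, val, scope, i + 1)
    | none => (idx, val, scope, i + 1)
  else (idx, val, scope, i + 1)

def FindLastOperator_py (expr : String) : Bool × Int × Int :=
  let m := (expr.toList.foldl pvStepA1 ((0 : Int), (10000000000 : Int))).2
  let f := expr.toList.foldl (pvStepA2 m) ((-1 : Int), (0 : Int), (0 : Int), (0 : Int))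
  if f.1 ≠ -1 then (true, f.1, m) else (false, -1, m)

-- ===== PORT B =====
-- B's single pass: state (depth, minDepth, cands, i)
def pvStepB (st : Int × Int × List (Int × Int × Int) × Int) (c : Char) :
    Int × Int × List (Int × Int × Int) × Int :=
  let depth := st.1; let minD := st.2.1; let cands := st.2.2.1; let i := st.2.2.2
  if c = '(' then (depth + 1, minD, cands, i + 1)
  else if c = ')' then (depth - 1, minD, cands, i + 1)
  else
    let minD' := if depth < minD then depth else minD
    match pvPrec c with
    | some p => (depth, minD', cands ++ [(depth, i, p)], i + 1)
    | none => (depth, minD', cands, i + 1)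

-- B's selection loop over the candidate list: state (idx, val)
def pvSel (m : Int) (st : Int × Int) (t : Int × Int × Int) : Int × Int :=
  if t.1 = m ∧ t.2.2 > st.2 then (t.2.1, t.2.2) else st

def FindLastOperator_py_alt (expr : String) : Bool × Int × Int :=
  let s := expr.toList.foldl pvStepB ((0 : Int), (10000000000 : Int), ([] : List (Int × Int × Int)), (0 : Int))
  let minD := s.2.1
  let r := s.2.2.1.foldl (pvSel minD) ((-1 : Int), (0 : Int))
  (decide (r.1 ≠ -1), r.1, minD)

-- ===== PRECONDITION & SPEC =====
def Spec_FindLastOperator_py (expr : String) (out : Bool × Int × Int) : Prop := out = FindLastOperator_py_alt expr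
instance (expr : String) (out : Bool × Int × Int) : Decidable (Spec_FindLastOperator_py expr out) := by unfold Spec_FindLastOperator_py; infer_instance

-- ===== CLAIM (what is proved, stated in full; the proofs are below) =====
def Claim_equal_FindLastOperator_py : Prop := ∀ (expr : String), Dom_FindLastOperator_py expr → Spec_FindLastOperator_py expr (FindLastOperator_py expr)

-- ===== LEMMAS AND PROOFS =====

-- B's pass tracks the same depth and the same minimum depth as A's first loop
theorem pv_depth_minD (cs : List Char) :
    ∀ (d m : Int) (cands : List (Int × Int × Int)) (i : Int),
      (cs.foldl pvStepB (d, m, cands, i)).1 = (cs.foldl pvStepA1 (d, m)).1 ∧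
      (cs.foldl pvStepB (d, m, cands, i)).2.1 = (cs.foldl pvStepA1 (d, m)).2 := by
  induction cs with
  | nil => intro d m cands i; exact ⟨rfl, rfl⟩
  | cons c cs ih =>
    intro d m cands i
    by_cases h1 : c = '('
    · simpa [pvStepB, pvStepA1, h1] using ih (d + 1) m cands (i + 1)
    by_cases h2 : c = ')'
    · simpa [pvStepB, pvStepA1, h1, h2] using ih (d - 1) m cands (i + 1)
    by_cases h3 : d < m
    · cases hp : pvPrec c <;>
        simpa [pvStepB, pvStepA1, h1, h2, h3, hp] using
          ih d d (match pvPrec c with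
                  | some p => cands ++ [(d, i, p)]
                  | none => cands) (i + 1)
    · cases hp : pvPrec c <;>
        simpa [pvStepB, pvStepA1, h1, h2, h3, hp] using
          ih d m (match pvPrec c with
                  | some p => cands ++ [(d, i, p)]
                  | none => cands) (i + 1)

-- selecting over the candidates B appends reproduces A's second loop (idx, val)
theorem pv_sel_eq (cs : List Char) :
    ∀ (m mB d i idx val : Int) (cands : List (Int × Int × Int)) (p0 : Int × Int),
      cands.foldl (pvSel m) p0 = (idx, val) →
      ((cs.foldl pvStepB (d, mB, cands, i)).2.2.1).foldl (pvSel m) p0 =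
        ((cs.foldl (pvStepA2 m) (idx, val, d, i)).1,
         (cs.foldl (pvStepA2 m) (idx, val, d, i)).2.1) := by
  induction cs with
  | nil => intro m mB d i idx val cands p0 h; simpa using h
  | cons c cs ih =>
    intro m mB d i idx val cands p0 h
    by_cases h1 : c = '('
    · have : pvPrec c = none := by rw [h1]; rfl
      by_cases hm : d + 1 = m <;>
        simpa [pvStepB, pvStepA2, h1, this, hm] using ih m mB (d + 1) (i + 1) idx val cands p0 h
    by_cases h2 : c = ')'
    · have : pvPrec c = none := by rw [h2]; rfl
      by_cases hm : d - 1 = m <;>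
        simpa [pvStepB, pvStepA2, h1, h2, this, hm] using ih m mB (d - 1) (i + 1) idx val cands p0 h
    cases hp : pvPrec c with
    | none =>
      by_cases hm : d = m <;>
        simpa [pvStepB, pvStepA2, h1, h2, hp, hm] using
          ih m (if d < mB then d else mB) d (i + 1) idx val cands p0 h
    | some p =>
      have hnew : (cands ++ [(d, i, p)]).foldl (pvSel m) p0 =
          (if d = m ∧ p > val then (i, p) else (idx, val)) := by
        rw [List.foldl_append, h]
        simp [pvSel]
      by_cases hm : d = m
      · subst hm
        by_cases hv : p > val
        · simpa [pvStepB, pvStepA2, h1, h2, hp, hv] using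
            ih d (if d < mB then d else mB) d (i + 1) i p (cands ++ [(d, i, p)]) p0
              (by simp [List.foldl_append, h, pvSel, hv])
        · simpa [pvStepB, pvStepA2, h1, h2, hp, hv] using
            ih d (if d < mB then d else mB) d (i + 1) idx val (cands ++ [(d, i, p)]) p0
              (by simp [List.foldl_append, h, pvSel, hv])
      · simpa [pvStepB, pvStepA2, h1, h2, hp, hm] using
          ih m (if d < mB then d else mB) d (i + 1) idx val (cands ++ [(d, i, p)]) p0
            (by simp [hnew, hm])

-- ===== VERDICT (by name: the statement is the Claim_ definition above) =====
theorem FindLastOperator_py_spec : Claim_equal_FindLastOperator_py := by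
  intro expr _
  unfold Spec_FindLastOperator_py FindLastOperator_py FindLastOperator_py_alt
  have hmd := pv_depth_minD expr.toList 0 10000000000 [] 0
  set m := (expr.toList.foldl pvStepA1 ((0 : Int), (10000000000 : Int))).2 with hm
  have hsel := pv_sel_eq expr.toList m 10000000000 0 0 (-1) 0 [] ((-1 : Int), (0 : Int)) (by simp)
  simp only []
  rw [hmd.2, hsel]
  set a := expr.toList.foldl (pvStepA2 m) ((-1 : Int), (0 : Int), (0 : Int), (0 : Int)) with ha
  by_cases hidx : a.1 = -1 <;> simp [hidx]
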